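-- pv_equiv track=rewrite | github.com/Vivek-Bharakhada/quotation-ai | backend/color_extractor.py | extract_color_code
-- ===== SOURCE A (Python) =====
-- from typing import Dict, List, Tuple, Optional
--
-- COLOR_CODE_NAMES = {
--     # Aquant Finishes
--     "AB": "Antique Bronze",
--     "AC": "Antique Chrome",
--     "AN": "Antique Nickel",
--     "BRG": "Brushed Rose Gold",
--     "BG": "Brushed Gold",
--     "CP": "Chrome Plated",
--     "CH": "Chrome",
--     "G": "Gold",
--     "GG": "Graphite Grey",
--     "MB": "Matt Black",
--     "RG": "Rose Gold",
--     "W": "White",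
--     "WN": "Walnut",
--     "WG": "White Glass",
--
--     # Kohler & Plumber Finishes
--     "CB": "Chrome Black",
--     "CGY": "Chrome Grey",
--     "CW": "Chrome White",
--     "BCK": "Matt Black",
--     "WTE": "Matt White",
--     "GRY": "Matt Grey",
--     "BCG": "Black Champagne Gold",
--     "CNG": "Champagne Gold",
--     "RGD": "Rose Gold",
--     "GM": "Gun Metal",
--     "SSF": "Brushed Stainless Steel",
--     "ORB": "Oil Rubbed Bronze",
--     "SN": "Satin Nickel",
-- }
--
-- def extract_color_code(product_code: str) -> Tuple[Optional[str], Optional[str]]: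
--     """
--     Extract color code from product code.
--
--     Examples:
--         "2637AB" → ("2637", "AB")
--         "K-28362IN-CP" → ("K-28362IN", "CP")
--         "9272" → ("9272", None)
--
--     Returns:
--         (base_code, color_code) or (code, None) if no color detected
--     """
--     if not product_code:
--         return None, None
--
--     product_code = product_code.strip().upper()
--
--     # Try to match patterns with color codes
--     # Pattern 1: Code ending with known color code (2-3 chars)
--     for color in sorted(COLOR_CODE_NAMES.keys(), key=len, reverse=True):
--         if product_code.endswith(color):
--             base = product_code[:-len(color)].strip()
--             if base and len(base) >= 2:  # Must have a real code
--                 return base, color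
--
--     return product_code, None
-- ===== SOURCE B (Python) =====
-- COLOR_CODE_NAMES = {
--     # Aquant Finishes
--     "AB": "Antique Bronze",
--     "AC": "Antique Chrome",
--     "AN": "Antique Nickel",
--     "BRG": "Brushed Rose Gold",
--     "BG": "Brushed Gold",
--     "CP": "Chrome Plated",
--     "CH": "Chrome",
--     "G": "Gold",
--     "GG": "Graphite Grey",
--     "MB": "Matt Black",
--     "RG": "Rose Gold",
--     "W": "White",
--     "WN": "Walnut",
--     "WG": "White Glass",
--
--     # Kohler & Plumber Finishes
--     "CB": "Chrome Black",
--     "CGY": "Chrome Grey",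
--     "CW": "Chrome White",
--     "BCK": "Matt Black",
--     "WTE": "Matt White",
--     "GRY": "Matt Grey",
--     "BCG": "Black Champagne Gold",
--     "CNG": "Champagne Gold",
--     "RGD": "Rose Gold",
--     "GM": "Gun Metal",
--     "SSF": "Brushed Stainless Steel",
--     "ORB": "Oil Rubbed Bronze",
--     "SN": "Satin Nickel",
-- }
--
-- def _try_suffix(code, n):
--     """If the n-char suffix of code is a known color and the base is a real
--     code (>= 2 chars after stripping), return (base, suffix); else None."""
--     suf = code[-n:]
--     if len(code) >= n and suf in COLOR_CODE_NAMES: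
--         base = code[:-n].strip()
--         if len(base) >= 2:
--             return base, suf
--     return None
--
-- def extract_color_code(product_code):
--     if not product_code:
--         return None, None
--     code = product_code.strip().upper()
--     # Known color codes are 1-3 chars: longest suffix wins, or-chain falls through.
--     return (_try_suffix(code, 3) or _try_suffix(code, 2)
--             or _try_suffix(code, 1) or (code, None))
-- ===== Notes on version B (the rewrite author's own statement) =====
-- stated objective: simpler
-- what changed: Replaced A's sort-all-27-keys-by-length-then-scan-with-endswith loop by a loop-free or-chain of three direct dict lookups of the 3/2/1-char suffix (helper _try_suffix), with fall-through when the base is too short.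
import Mathlib
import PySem

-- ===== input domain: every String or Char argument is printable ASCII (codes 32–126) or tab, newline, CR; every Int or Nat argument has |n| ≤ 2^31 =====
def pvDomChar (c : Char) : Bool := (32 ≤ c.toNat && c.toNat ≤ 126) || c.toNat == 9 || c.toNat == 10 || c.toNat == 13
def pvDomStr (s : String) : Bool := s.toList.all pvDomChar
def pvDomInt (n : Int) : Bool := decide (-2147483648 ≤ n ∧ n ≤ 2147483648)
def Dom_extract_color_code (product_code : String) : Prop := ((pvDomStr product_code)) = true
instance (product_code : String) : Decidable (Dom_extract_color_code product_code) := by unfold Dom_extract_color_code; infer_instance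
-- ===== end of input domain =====

-- B replaces A's sort-all-keys-by-length-then-scan-with-endswith loop by a loop-free
-- or-chain of three direct fixed-length suffix lookups in the dict (objective: simpler).

-- ===== PORT A =====
-- the module-level dict (shared context of both implementations)
def COLOR_CODE_NAMES : PySem.Dict String String := PySem.Dict.ofList [
  ("AB", "Antique Bronze"), ("AC", "Antique Chrome"), ("AN", "Antique Nickel"),
  ("BRG", "Brushed Rose Gold"), ("BG", "Brushed Gold"), ("CP", "Chrome Plated"),
  ("CH", "Chrome"), ("G", "Gold"), ("GG", "Graphite Grey"), ("MB", "Matt Black"),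
  ("RG", "Rose Gold"), ("W", "White"), ("WN", "Walnut"), ("WG", "White Glass"),
  ("CB", "Chrome Black"), ("CGY", "Chrome Grey"), ("CW", "Chrome White"),
  ("BCK", "Matt Black"), ("WTE", "Matt White"), ("GRY", "Matt Grey"),
  ("BCG", "Black Champagne Gold"), ("CNG", "Champagne Gold"), ("RGD", "Rose Gold"),
  ("GM", "Gun Metal"), ("SSF", "Brushed Stainless Steel"), ("ORB", "Oil Rubbed Bronze"),
  ("SN", "Satin Nickel")]

-- A's for-loop over the sorted keys, returning at the first accepted match
def pvLoopA : List String → List Char → Option (List Char × String)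
  | [], _ => none
  | color :: rest, s =>
    if PySem.Chars.endswith s color.toList then
      let base := PySem.Chars.strip (PySem.List.slice s none (some (-(PySem.Str.len color : Int))))
      if ¬(base = []) ∧ 2 ≤ base.length then some (base, color)
      else pvLoopA rest s
    else pvLoopA rest s

def extract_color_code (product_code : String) : Option String × Option String :=
  if product_code.toList = [] then (none, none)
  else
    let s := PySem.Chars.upper (PySem.Chars.strip product_code.toList)
    match pvLoopA (PySem.List.sorted (PySem.Dict.keys COLOR_CODE_NAMES) (fun k => PySem.Str.len k) true) s with
    | some (base, color) => (some (String.ofList base), some color)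
    | none => (some (String.ofList s), none)

-- ===== PORT B =====
-- B's _try_suffix helper: no loop, one fixed-length suffix lookup
def pvTrySuffix (s : List Char) (n : Nat) : Option (List Char × List Char) :=
  let suf := PySem.List.slice s (some (-(n : Int))) none
  if n ≤ s.length ∧ PySem.Dict.contains COLOR_CODE_NAMES (String.ofList suf) = true then
    let base := PySem.Chars.strip (PySem.List.slice s none (some (-(n : Int))))
    if 2 ≤ base.length then some (base, suf) else none
  else none

def extract_color_code_alt (product_code : String) : Option String × Option String :=
  if product_code.toList = [] then (none, none)
  else
    let s := PySem.Chars.upper (PySem.Chars.strip product_code.toList)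
    -- Python's `x or y or z or default` chain on Option results
    match (pvTrySuffix s 3).orElse (fun _ => (pvTrySuffix s 2).orElse (fun _ => pvTrySuffix s 1)) with
    | some (base, suffix) => (some (String.ofList base), some (String.ofList suffix))
    | none => (some (String.ofList s), none)

-- ===== PRECONDITION & SPEC =====
def Spec_extract_color_code (product_code : String) (out : Option String × Option String) : Prop := out = extract_color_code_alt product_code
instance (product_code : String) (out : Option String × Option String) : Decidable (Spec_extract_color_code product_code out) := by unfold Spec_extract_color_code; infer_instance

-- ===== CLAIM (what is proved, stated in full; the proofs are below) =====
def Claim_equal_extract_color_code : Prop := ∀ (product_code : String), Dom_extract_color_code product_code → Spec_extract_color_code product_code (extract_color_code product_code)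

-- ===== LEMMAS AND PROOFS =====
def pvKeys3 : List String := ["BRG","CGY","BCK","WTE","GRY","BCG","CNG","RGD","SSF","ORB"]
def pvKeys2 : List String := ["AB","AC","AN","BG","CP","CH","GG","MB","RG","WN","WG","CB","CW","GM","SN"]
def pvKeys1 : List String := ["G","W"]

lemma pv_sorted_keys : PySem.List.sorted (PySem.Dict.keys COLOR_CODE_NAMES) (fun k => PySem.Str.len k) true
    = pvKeys3 ++ (pvKeys2 ++ (pvKeys1 ++ [])) := by decide

lemma pv_mem_ofList (x : List Char) (l : List String) : String.ofList x ∈ l ↔ x ∈ l.map String.toList := by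
  simp only [List.mem_map]
  constructor
  · intro h; exact ⟨String.ofList x, h, by simp⟩
  · rintro ⟨k, hk, rfl⟩; simpa using hk

-- membership of a length-L suffix in the dict is membership in the length-L key group
lemma pv_contains_len (x : List Char) (L : Nat) (ks : List String)
    (hf : ((PySem.Dict.keys COLOR_CODE_NAMES).map String.toList).filter (fun y => y.length == L) = ks.map String.toList)
    (h : x.length = L) :
    PySem.Dict.contains COLOR_CODE_NAMES (String.ofList x) = true ↔ x ∈ ks.map String.toList := by
  rw [PySem.Dict.contains_eq_decide_mem_keys, decide_eq_true_iff, pv_mem_ofList, ← hf, List.mem_filter]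
  simp [h]

lemma pv_loopA_skip (ks rest : List String) (s : List Char)
    (h : ∀ k ∈ ks, PySem.Chars.endswith s k.toList = false) :
    pvLoopA (ks ++ rest) s = pvLoopA rest s := by
  induction ks with
  | nil => rfl
  | cons k ks ih =>
    simp only [List.cons_append, pvLoopA, h k (by simp)]
    exact ih (fun k' hk' => h k' (by simp [hk']))

-- one whole length group of A's scan collapses to a single suffix test
lemma pv_loopA_group (L : Nat) (hL0 : 0 < L) (ks rest : List String) (s : List Char)
    (hlen : ∀ k ∈ ks, k.toList.length = L) (hnd : (ks.map String.toList).Nodup) :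
    pvLoopA (ks ++ rest) s =
      if L ≤ s.length ∧ s.drop (s.length - L) ∈ ks.map String.toList then
        (if 2 ≤ (PySem.Chars.strip (s.take (s.length - L))).length
         then some (PySem.Chars.strip (s.take (s.length - L)), String.ofList (s.drop (s.length - L)))
         else pvLoopA rest s)
      else pvLoopA rest s := by
  induction ks with
  | nil => simp
  | cons k ks ih =>
    have hkL : k.toList.length = L := hlen k (by simp)
    by_cases he : PySem.Chars.endswith s k.toList = true
    · have hsuf : k.toList <:+ s := (PySem.Chars.endswith_iff s k.toList).mp he
      have hle : L ≤ s.length := hkL ▸ hsuf.length_le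
      have hdrop : s.drop (s.length - L) = k.toList := by
        have := List.suffix_iff_eq_drop.mp hsuf
        rw [hkL] at this; exact this.symm
      have hmem : s.drop (s.length - L) ∈ (k :: ks).map String.toList := by simp [hdrop]
      simp only [List.cons_append, pvLoopA, he, if_true]
      rw [PySem.Str.len_eq, hkL, PySem.List.slice_to_neg_natCast s L hL0]
      have hcond : L ≤ s.length ∧ s.drop (s.length - L) ∈ (k :: ks).map String.toList := ⟨hle, hmem⟩
      rw [if_pos hcond]
      by_cases hb : 2 ≤ (PySem.Chars.strip (s.take (s.length - L))).length
      · have hne : ¬(PySem.Chars.strip (s.take (s.length - L)) = []) := by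
          intro hnil; rw [hnil] at hb; simp at hb
        have hba : ¬(PySem.Chars.strip (s.take (s.length - L)) = []) ∧ 2 ≤ (PySem.Chars.strip (s.take (s.length - L))).length := ⟨hne, hb⟩
        rw [if_pos hb, if_pos hba, hdrop]
        simp
      · have hba : ¬(¬(PySem.Chars.strip (s.take (s.length - L)) = []) ∧ 2 ≤ (PySem.Chars.strip (s.take (s.length - L))).length) := fun h => hb h.2
        rw [if_neg hb, if_neg hba]
        have hskip : ∀ k' ∈ ks, PySem.Chars.endswith s k'.toList = false := by
          intro k' hk'
          cases h' : PySem.Chars.endswith s k'.toList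
          · rfl
          · exfalso
            have hsuf' : k'.toList <:+ s := (PySem.Chars.endswith_iff s k'.toList).mp h'
            have hdrop' : s.drop (s.length - L) = k'.toList := by
              have := List.suffix_iff_eq_drop.mp hsuf'
              rw [hlen k' (by simp [hk'])] at this; exact this.symm
            have hkk : k.toList = k'.toList := by rw [← hdrop, ← hdrop']
            have hnodup := hnd
            simp only [List.map_cons, List.nodup_cons] at hnodup
            exact hnodup.1 (hkk ▸ List.mem_map_of_mem hk')
        exact pv_loopA_skip ks rest s hskip
    · have he' : PySem.Chars.endswith s k.toList = false := by
        cases h' : PySem.Chars.endswith s k.toList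
        · rfl
        · exact absurd h' he
      rw [show pvLoopA ((k :: ks) ++ rest) s = pvLoopA (ks ++ rest) s from by
            simp [pvLoopA, he'],
          ih (fun k' hk' => hlen k' (by simp [hk']))
            (by simp only [List.map_cons, List.nodup_cons] at hnd; exact hnd.2)]
      have hknot : L ≤ s.length → s.drop (s.length - L) ≠ k.toList := by
        intro hle hdrop
        apply he
        rw [PySem.Chars.endswith_iff]
        exact hdrop ▸ List.drop_suffix _ _
      have hc : (L ≤ s.length ∧ s.drop (s.length - L) ∈ ks.map String.toList)
          ↔ (L ≤ s.length ∧ s.drop (s.length - L) ∈ (k :: ks).map String.toList) := by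
        constructor
        · rintro ⟨hle, hm⟩; exact ⟨hle, by simp [hm]⟩
        · rintro ⟨hle, hm⟩
          refine ⟨hle, ?_⟩
          simp only [List.map_cons, List.mem_cons] at hm
          rcases hm with hm | hm
          · exact absurd hm (hknot hle)
          · exact hm
      rw [if_congr hc rfl rfl]

-- B's helper in drop/take form
lemma pv_trySuffix_eq (n : Nat) (hn : 0 < n) (s : List Char) :
    pvTrySuffix s n =
      if n ≤ s.length ∧ PySem.Dict.contains COLOR_CODE_NAMES (String.ofList (s.drop (s.length - n))) = true then
        (if 2 ≤ (PySem.Chars.strip (s.take (s.length - n))).length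
         then some (PySem.Chars.strip (s.take (s.length - n)), s.drop (s.length - n))
         else none)
      else none := by
  simp only [pvTrySuffix, PySem.List.slice_from_neg_natCast s n hn, PySem.List.slice_to_neg_natCast s n hn]

-- combined per-length step, with the dict-membership condition
lemma pv_group_eq (L : Nat) (hL0 : 0 < L) (ks rest : List String) (s : List Char)
    (hlen : ∀ k ∈ ks, k.toList.length = L) (hnd : (ks.map String.toList).Nodup)
    (hf : ((PySem.Dict.keys COLOR_CODE_NAMES).map String.toList).filter (fun y => y.length == L) = ks.map String.toList) :
    pvLoopA (ks ++ rest) s =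
      if L ≤ s.length ∧ PySem.Dict.contains COLOR_CODE_NAMES (String.ofList (s.drop (s.length - L))) = true then
        (if 2 ≤ (PySem.Chars.strip (s.take (s.length - L))).length
         then some (PySem.Chars.strip (s.take (s.length - L)), String.ofList (s.drop (s.length - L)))
         else pvLoopA rest s)
      else pvLoopA rest s := by
  rw [pv_loopA_group L hL0 ks rest s hlen hnd]
  have hc : (L ≤ s.length ∧ s.drop (s.length - L) ∈ ks.map String.toList)
      ↔ (L ≤ s.length ∧ PySem.Dict.contains COLOR_CODE_NAMES (String.ofList (s.drop (s.length - L))) = true) := by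
    constructor
    · rintro ⟨hle, hm⟩
      have hdl : (s.drop (s.length - L)).length = L := by rw [List.length_drop]; omega
      exact ⟨hle, (pv_contains_len _ L ks hf hdl).mpr hm⟩
    · rintro ⟨hle, hm⟩
      have hdl : (s.drop (s.length - L)).length = L := by rw [List.length_drop]; omega
      exact ⟨hle, (pv_contains_len _ L ks hf hdl).mp hm⟩
  rw [if_congr hc rfl rfl]

lemma pv_loops_agree (s : List Char) :
    pvLoopA (pvKeys3 ++ (pvKeys2 ++ (pvKeys1 ++ []))) s
      = ((pvTrySuffix s 3).orElse (fun _ => (pvTrySuffix s 2).orElse (fun _ => pvTrySuffix s 1))).map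
          (fun p => (p.1, String.ofList p.2)) := by
  rw [pv_group_eq 3 (by omega) pvKeys3 _ s (by decide) (by decide) (by decide),
      pv_group_eq 2 (by omega) pvKeys2 _ s (by decide) (by decide) (by decide),
      pv_group_eq 1 (by omega) pvKeys1 [] s (by decide) (by decide) (by decide),
      pv_trySuffix_eq 3 (by omega), pv_trySuffix_eq 2 (by omega), pv_trySuffix_eq 1 (by omega)]
  simp only [pvLoopA]
  split_ifs <;> simp [Option.orElse]

-- ===== VERDICT (by name: the statement is the Claim_ definition above) =====
theorem extract_color_code_spec : Claim_equal_extract_color_code := by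
  intro product_code _
  show extract_color_code product_code = extract_color_code_alt product_code
  unfold extract_color_code extract_color_code_alt
  by_cases h0 : product_code.toList = []
  · simp [h0]
  · rw [if_neg h0, if_neg h0]
    show (match pvLoopA (PySem.List.sorted (PySem.Dict.keys COLOR_CODE_NAMES) (fun k => PySem.Str.len k) true)
            (PySem.Chars.upper (PySem.Chars.strip product_code.toList)) with
          | some (base, color) => (some (String.ofList base), some color)
          | none => (some (String.ofList (PySem.Chars.upper (PySem.Chars.strip product_code.toList))), none))
        = (match ((pvTrySuffix (PySem.Chars.upper (PySem.Chars.strip product_code.toList)) 3).orElse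
              (fun _ => (pvTrySuffix (PySem.Chars.upper (PySem.Chars.strip product_code.toList)) 2).orElse
                (fun _ => pvTrySuffix (PySem.Chars.upper (PySem.Chars.strip product_code.toList)) 1))) with
          | some (base, suffix) => (some (String.ofList base), some (String.ofList suffix))
          | none => (some (String.ofList (PySem.Chars.upper (PySem.Chars.strip product_code.toList))), none))
    rw [pv_sorted_keys, pv_loops_agree]
    cases ((pvTrySuffix (PySem.Chars.upper (PySem.Chars.strip product_code.toList)) 3).orElse
              (fun _ => (pvTrySuffix (PySem.Chars.upper (PySem.Chars.strip product_code.toList)) 2).orElse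
                (fun _ => pvTrySuffix (PySem.Chars.upper (PySem.Chars.strip product_code.toList)) 1))) with
    | none => rfl
    | some p => rfl
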